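-- pv_equiv track=rewrite | github.com/qyinm/PS | BOJ/14889/main.py | divide_equal_groups_unique
-- ===== SOURCE A (Python) =====
-- from itertools import combinations
--
-- def divide_equal_groups_unique(origin, k):
--     result = []
--
--     for comb in combinations(origin, k):
--         group1 = list(comb)
--         group2 = [x for x in origin if x not in group1]
--         if group1[0] < group2[0]:
--             result.append([group1, group2])
--
--     return result
-- ===== SOURCE B (Python) =====
-- def divide_equal_groups_unique(origin, k):
--     n = len(origin)
--
--     def rec(start, chosen, result):
--         if len(chosen) == k:
--             group1 = chosen
--             group2 = [x for x in origin if x not in group1]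
--             if group1[0] < group2[0]:
--                 result = result + [[group1, group2]]
--             return result
--         if start == n:
--             return result
--         # take origin[start], then skip it: yields ascending-index (lexicographic) order
--         result = rec(start + 1, chosen + [origin[start]], result)
--         return rec(start + 1, chosen, result)
--
--     return rec(0, [], [])
-- ===== Notes on version B (the rewrite author's own statement) =====
-- stated objective: alternative
-- what changed: Replaced the itertools.combinations generator loop by a pure binary take/skip recursion over start indices that threads the result accumulator, emitting each k-subset in the same lexicographic order.
import Mathlib
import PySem

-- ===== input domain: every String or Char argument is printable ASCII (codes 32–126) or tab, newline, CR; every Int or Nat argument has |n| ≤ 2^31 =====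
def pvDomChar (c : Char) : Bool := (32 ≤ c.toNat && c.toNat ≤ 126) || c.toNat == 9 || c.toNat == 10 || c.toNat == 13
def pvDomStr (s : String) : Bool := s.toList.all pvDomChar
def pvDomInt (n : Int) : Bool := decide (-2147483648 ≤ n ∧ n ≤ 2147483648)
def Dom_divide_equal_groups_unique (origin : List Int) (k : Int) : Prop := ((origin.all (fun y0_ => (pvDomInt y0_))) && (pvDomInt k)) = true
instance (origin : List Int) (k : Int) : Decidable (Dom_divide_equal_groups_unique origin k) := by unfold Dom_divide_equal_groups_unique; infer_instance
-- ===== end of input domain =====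

-- B replaces itertools.combinations with a pure binary take/skip recursion threading the
-- result accumulator; same cost, different decomposition (objective: alternative).


-- ===== PORT A =====
-- shared with port B: both Python sources contain literally these three lines
-- (group2 comprehension, the group1[0] < group2[0] test, the append); on Pre_ both
-- pyGet? values are `some`, so the `_, _` arm (Python's IndexError) is never taken.
def pvEmit (origin : List Int) (result : List (List (List Int))) (group1 : List Int) :
    List (List (List Int)) :=
  let group2 := origin.filter (fun x => !(group1.contains x))
  match PySem.List.pyGet? group1 (0 : Int), PySem.List.pyGet? group2 (0 : Int) with
  | some a, some b => if a < b then result ++ [[group1, group2]] else result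
  | _, _ => result

-- itertools.combinations(xs, k) in its ascending-index (lexicographic) order
def combsA : Nat → List Int → List (List Int)
  | 0, _ => [[]]
  | _ + 1, [] => []
  | k + 1, x :: rest => ((combsA k rest).map (fun c => x :: c)) ++ combsA (k + 1) rest

-- k.toNat is exact for k ≥ 0; combinations raises ValueError for k < 0 (outside Pre_)
def divide_equal_groups_unique (origin : List Int) (k : Int) : List (List (List Int)) :=
  (combsA k.toNat origin).foldl (fun result comb => pvEmit origin result comb) []

-- ===== PORT B =====
-- rec(start, chosen, result) of Source B; `rest` is origin[start:], read only sequentially,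
-- so carrying the suffix instead of the index is exact.
def bGo (origin : List Int) (k : Int) (chosen : List Int) (rest : List Int)
    (result : List (List (List Int))) : List (List (List Int)) :=
  if (chosen.length : Int) = k then pvEmit origin result chosen
  else
    match rest with
    | [] => result
    | x :: rs => bGo origin k chosen rs (bGo origin k (chosen ++ [x]) rs result)

def divide_equal_groups_unique_alt (origin : List Int) (k : Int) : List (List (List Int)) :=
  bGo origin k [] origin []

-- ===== PRECONDITION & SPEC =====
-- Pre_ excludes exactly the inputs where A raises: k ≤ 0 (IndexError on group1[0] for
-- k = 0, ValueError for k < 0) and 1 ≤ k ≤ len with k ≥ #distinct values, where some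
-- combination covers all values and group2[0] raises IndexError.
def Pre_divide_equal_groups_unique (origin : List Int) (k : Int) : Prop :=
  1 ≤ k ∧ (k ≤ (origin.length : Int) → k < ((PySem.Set.ofList origin).length : Int))
instance (origin : List Int) (k : Int) : Decidable (Pre_divide_equal_groups_unique origin k) := by unfold Pre_divide_equal_groups_unique; infer_instance
def pvWitness_divide_equal_groups_unique : List Int × Int := ([1, 2, 3, 4], 2)

def Spec_divide_equal_groups_unique (origin : List Int) (k : Int) (out : List (List (List Int))) : Prop := out = divide_equal_groups_unique_alt origin k
instance (origin : List Int) (k : Int) (out : List (List (List Int))) : Decidable (Spec_divide_equal_groups_unique origin k out) := by unfold Spec_divide_equal_groups_unique; infer_instance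

-- ===== CLAIM (what is proved, stated in full; the proofs are below) =====
def Claim_equal_divide_equal_groups_unique : Prop := ∀ (origin : List Int) (k : Int), Dom_divide_equal_groups_unique origin k → Pre_divide_equal_groups_unique origin k → Spec_divide_equal_groups_unique origin k (divide_equal_groups_unique origin k)

-- ===== LEMMAS AND PROOFS =====

-- Backtracking enumerates exactly combsA m rest (prefixed by `chosen`), folding pvEmit.
lemma bGo_eq (origin : List Int) (k : Int) :
    ∀ (rest : List Int) (m : Nat) (chosen : List Int) (result : List (List (List Int))),
      k = (chosen.length : Int) + m →
      bGo origin k chosen rest result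
        = ((combsA m rest).map (fun c => chosen ++ c)).foldl
            (fun r c => pvEmit origin r c) result := by
  intro rest
  induction rest with
  | nil =>
    intro m chosen result hk
    cases m with
    | zero => simp [bGo, combsA, hk]
    | succ m' =>
      rw [bGo]
      rw [if_neg (by omega)]
      simp [combsA]
  | cons x rs ih =>
    intro m chosen result hk
    cases m with
    | zero => simp [bGo, combsA, hk]
    | succ m' =>
      rw [bGo]
      rw [if_neg (by omega)]
      rw [ih m' (chosen ++ [x]) result (by simp only [List.length_append, List.length_cons, List.length_nil]; push_cast; push_cast at hk; omega)]
      rw [ih (m' + 1) chosen _ hk]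
      simp [combsA, List.map_append, List.foldl_append, List.map_map, Function.comp_def]

-- ===== VERDICT (by name: the statement is the Claim_ definition above) =====
theorem divide_equal_groups_unique_spec : Claim_equal_divide_equal_groups_unique := by
  intro origin k _ hpre
  unfold Pre_divide_equal_groups_unique at hpre
  unfold Spec_divide_equal_groups_unique divide_equal_groups_unique divide_equal_groups_unique_alt
  rw [bGo_eq origin k origin k.toNat [] []
      (by simp; omega)]
  simp
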